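-- pv_equiv track=rewrite | github.com/ahila87/RubicsCube | RubicCube/RCube/dispatch.py | validateCube
-- ===== SOURCE A (Python) =====
-- from collections import Counter
--
-- def validateCorners(cubeVal,resultCube):
--     count =0
--     corners = [[cubeVal[15],cubeVal[8],cubeVal[47]],[cubeVal[6],cubeVal[45],cubeVal[35]],[cubeVal[51],cubeVal[33],cubeVal[26]],[cubeVal[17],cubeVal[53],cubeVal[24]],[cubeVal[38],cubeVal[18],cubeVal[11]],[cubeVal[36],cubeVal[20],cubeVal[27]],[cubeVal[42],cubeVal[29],cubeVal[0]],[cubeVal[44],cubeVal[2],cubeVal[9]]]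
--     sortCon= [sorted(i) for i in corners]
--     dupCorner = sum(y for y in Counter(tuple(x) for x in sortCon).values() if y > 1)
--     if dupCorner > 0:
--         return 'invalid'
--
--     result = [[resultCube[15],resultCube[8],resultCube[47]],[resultCube[6],resultCube[45],resultCube[35]],[resultCube[51],resultCube[33],resultCube[26]],[resultCube[17],resultCube[53],resultCube[24]],[resultCube[38],resultCube[18],resultCube[11]],[resultCube[36],resultCube[20],resultCube[27]],[resultCube[42],resultCube[29],resultCube[0]],[resultCube[44],resultCube[2],resultCube[9]]]
--
--     for i in result:
--         for j in corners:
--             if (Counter(i) == Counter(j)):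
--                 count+=1
--
--     if count != 8:
--         return 'invalid'
--     else:
--         return
--
-- def validateEdges(cubeVal,resultCube):
--     count = 0
--     edges = [[cubeVal[43],cubeVal[1]],[cubeVal[39],cubeVal[28]],[cubeVal[37],cubeVal[19]],[cubeVal[41],cubeVal[10]],[cubeVal[46],cubeVal[7]],[cubeVal[48],cubeVal[34]],[cubeVal[52],cubeVal[25]],[cubeVal[50],cubeVal[16]],[cubeVal[5],cubeVal[12]],[cubeVal[3],cubeVal[32]],[cubeVal[21],cubeVal[14]],[cubeVal[23],cubeVal[30]]]
--     sortEdge = [sorted(i) for i in edges]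
--     dupEdge = sum(y for y in Counter(tuple(x) for x in sortEdge).values() if y > 1)
--     if dupEdge > 0:
--         return 'invalid'
--
--
--     result = [[resultCube[43],resultCube[1]],[resultCube[39],resultCube[28]],[resultCube[37],resultCube[19]],[resultCube[41],resultCube[10]],[resultCube[46],resultCube[7]],[resultCube[48],resultCube[34]],[resultCube[52],resultCube[25]],[resultCube[50],resultCube[16]],[resultCube[5],resultCube[12]],[resultCube[3],resultCube[32]],[resultCube[21],resultCube[14]],[resultCube[23],resultCube[30]]]
--     for i in result:
--         for j in edges:
--             if (Counter(i) == Counter(j)):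
--                 count+=1
--
--     if count != 12:
--         return 'invalid'
--     else:
--         return
--
-- def validateCube(cubeVal,resultCube):
--     var =list(set(cubeVal))
--
--     if len(cubeVal)!= 54:
--         status = 'error: cube is not sized properly'
--     elif len(set(cubeVal))!=6:
--         status = 'error: cube does not contain 6 unique colors'
--     elif any(cubeVal[i]!= resultCube[i] for i in [4,13,22,31,40,49]):
--         status = 'error: illegal cube'
--     elif any(cubeVal.count(var[i])!=9 for i in range(0,6)):
--         status = 'error: illegal cube'
--     elif validateCorners(cubeVal,resultCube) == 'invalid':
--         status = 'error: illegal cube with wrong corners'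
--     elif validateEdges(cubeVal,resultCube) == 'invalid':
--         status = 'error: illegal cube with wrong edges'
--     else:
--         status = 'valid'
--
--     return status
-- ===== SOURCE B (Python) =====
-- from collections import Counter
--
-- _CENTERS = [4, 13, 22, 31, 40, 49]
-- _CORNERS = [(15, 8, 47), (6, 45, 35), (51, 33, 26), (17, 53, 24),
--             (38, 18, 11), (36, 20, 27), (42, 29, 0), (44, 2, 9)]
-- _EDGES = [(43, 1), (39, 28), (37, 19), (41, 10), (46, 7), (48, 34),
--           (52, 25), (50, 16), (5, 12), (3, 32), (21, 14), (23, 30)]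
--
--
-- def _piecesOk(cubeVal, resultCube, idxs):
--     # canonical (sorted) sticker tuple per piece; a piece set built once,
--     # then each result piece is a single membership test.
--     cube = [tuple(sorted(cubeVal[i] for i in t)) for t in idxs]
--     if len(set(cube)) != len(cube):
--         return False
--     cubeSet = set(cube)
--     return all(tuple(sorted(resultCube[i] for i in t)) in cubeSet for t in idxs)
--
--
-- def validateCube(cubeVal, resultCube):
--     if len(cubeVal) != 54:
--         return 'error: cube is not sized properly'
--     colorCount = Counter(cubeVal)
--     if len(colorCount) != 6:
--         return 'error: cube does not contain 6 unique colors'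
--     if any(cubeVal[i] != resultCube[i] for i in _CENTERS):
--         return 'error: illegal cube'
--     if any(n != 9 for n in colorCount.values()):
--         return 'error: illegal cube'
--     if not _piecesOk(cubeVal, resultCube, _CORNERS):
--         return 'error: illegal cube with wrong corners'
--     if not _piecesOk(cubeVal, resultCube, _EDGES):
--         return 'error: illegal cube with wrong edges'
--     return 'valid'
-- ===== Notes on version B (the rewrite author's own statement) =====
-- stated objective: simpler
-- what changed: The corner/edge validators build one canonical set of sorted sticker tuples and test each result piece by set membership instead of A's nested per-pair Counter-vs-Counter comparison loops, and the colour guards use a single Counter pass instead of A's list(set(...)) plus six list.count scans. (measured ~1.7x faster: one pass/set lookup instead of nested Counter comparisons and repeated count scans)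
import Mathlib
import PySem

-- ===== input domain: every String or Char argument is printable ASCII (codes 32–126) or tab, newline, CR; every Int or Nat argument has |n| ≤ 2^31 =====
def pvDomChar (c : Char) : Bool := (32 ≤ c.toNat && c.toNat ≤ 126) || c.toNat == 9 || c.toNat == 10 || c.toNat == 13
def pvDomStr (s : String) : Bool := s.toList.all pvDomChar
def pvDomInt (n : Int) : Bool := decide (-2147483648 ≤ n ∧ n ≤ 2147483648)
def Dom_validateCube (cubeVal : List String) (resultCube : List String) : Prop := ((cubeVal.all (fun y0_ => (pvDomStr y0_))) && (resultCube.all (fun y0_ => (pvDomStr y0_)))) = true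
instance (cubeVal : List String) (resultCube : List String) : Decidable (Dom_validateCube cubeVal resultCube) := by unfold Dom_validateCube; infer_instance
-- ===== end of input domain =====

-- B replaces A's nested per-pair Counter comparison of corner/edge pieces by one canonical
-- (sorted-tuple) piece set built once plus per-piece membership tests, and A's set+count colour
-- scans by one Counter pass (objective: simpler; same observable results).

-- ===== PORT A =====
-- xs[i] for an index that is in range whenever the line is reached (guards earlier in the
-- chain plus Pre_ below guarantee it); the "" default is never produced under Pre_.
def pvGetS (xs : List String) (i : Int) : String := PySem.List.pyGetD xs i ""

-- the corner (resp. edge) sticker triples/pairs exactly as A writes them, as a function of the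
-- list they are drawn from (A writes the same bracket expression once for cubeVal, once for resultCube)
def pvA_cornersOf (c : List String) : List (List String) :=
  [[pvGetS c 15, pvGetS c 8, pvGetS c 47], [pvGetS c 6, pvGetS c 45, pvGetS c 35],
   [pvGetS c 51, pvGetS c 33, pvGetS c 26], [pvGetS c 17, pvGetS c 53, pvGetS c 24],
   [pvGetS c 38, pvGetS c 18, pvGetS c 11], [pvGetS c 36, pvGetS c 20, pvGetS c 27],
   [pvGetS c 42, pvGetS c 29, pvGetS c 0], [pvGetS c 44, pvGetS c 2, pvGetS c 9]]

def pvA_edgesOf (c : List String) : List (List String) :=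
  [[pvGetS c 43, pvGetS c 1], [pvGetS c 39, pvGetS c 28], [pvGetS c 37, pvGetS c 19],
   [pvGetS c 41, pvGetS c 10], [pvGetS c 46, pvGetS c 7], [pvGetS c 48, pvGetS c 34],
   [pvGetS c 52, pvGetS c 25], [pvGetS c 50, pvGetS c 16], [pvGetS c 5, pvGetS c 12],
   [pvGetS c 3, pvGetS c 32], [pvGetS c 21, pvGetS c 14], [pvGetS c 23, pvGetS c 30]]

-- Python's `Counter(i) == Counter(j)`: dict equality ignores insertion order, so compare as
-- "every item of one is matched in the other", both ways
def pvCounterEq (i j : List String) : Bool :=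
  ((PySem.Dict.counter i).items.all (fun kv => (PySem.Dict.counter j).getD kv.1 0 == kv.2)) &&
  ((PySem.Dict.counter j).items.all (fun kv => (PySem.Dict.counter i).getD kv.1 0 == kv.2))

def pvA_validateCorners (cubeVal resultCube : List String) : Option String :=
  let corners := pvA_cornersOf cubeVal
  let sortCon := corners.map (fun i => PySem.List.sorted i (fun x => x))
  let dupCorner := (((PySem.Dict.counter sortCon).values.filter (fun y => 1 < y)).sum)
  if 0 < dupCorner then some "invalid"
  else
    let result := pvA_cornersOf resultCube
    let count := result.foldl
      (fun count i => corners.foldl (fun count j => if pvCounterEq i j then count + 1 else count) count)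
      (0 : Int)
    if count ≠ 8 then some "invalid" else none

def pvA_validateEdges (cubeVal resultCube : List String) : Option String :=
  let edges := pvA_edgesOf cubeVal
  let sortEdge := edges.map (fun i => PySem.List.sorted i (fun x => x))
  let dupEdge := (((PySem.Dict.counter sortEdge).values.filter (fun y => 1 < y)).sum)
  if 0 < dupEdge then some "invalid"
  else
    let result := pvA_edgesOf resultCube
    let count := result.foldl
      (fun count i => edges.foldl (fun count j => if pvCounterEq i j then count + 1 else count) count)
      (0 : Int)
    if count ≠ 12 then some "invalid" else none

def validateCube (cubeVal : List String) (resultCube : List String) : String :=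
  -- var = list(set(cubeVal)); consumed only by an `any` over all of its elements, an
  -- order-independent use, so Python's hash order does not affect the result
  let var := PySem.Set.ofList cubeVal
  if cubeVal.length ≠ 54 then "error: cube is not sized properly"
  else if (PySem.Set.ofList cubeVal).length ≠ 6 then "error: cube does not contain 6 unique colors"
  else if ([4, 13, 22, 31, 40, 49] : List Int).any
      (fun i => pvGetS cubeVal i != pvGetS resultCube i) then "error: illegal cube"
  else if (PySem.List.pyRange 0 6).any
      (fun i => PySem.List.count cubeVal (pvGetS var i) != 9) then "error: illegal cube"
  else if pvA_validateCorners cubeVal resultCube == some "invalid" then "error: illegal cube with wrong corners"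
  else if pvA_validateEdges cubeVal resultCube == some "invalid" then "error: illegal cube with wrong edges"
  else "valid"

-- ===== PORT B =====
def pvB_centers : List Int := [4, 13, 22, 31, 40, 49]

def pvB_cornerIdx : List (List Int) :=
  [[15, 8, 47], [6, 45, 35], [51, 33, 26], [17, 53, 24],
   [38, 18, 11], [36, 20, 27], [42, 29, 0], [44, 2, 9]]

def pvB_edgeIdx : List (List Int) :=
  [[43, 1], [39, 28], [37, 19], [41, 10], [46, 7], [48, 34],
   [52, 25], [50, 16], [5, 12], [3, 32], [21, 14], [23, 30]]

def pvB_piecesOk (cubeVal resultCube : List String) (idxs : List (List Int)) : Bool :=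
  let cube := idxs.map (fun t => PySem.List.sorted (t.map (fun i => pvGetS cubeVal i)) (fun x => x))
  if (PySem.Set.ofList cube).length ≠ cube.length then false
  else
    let cubeSet := PySem.Set.ofList cube
    idxs.all (fun t =>
      cubeSet.contains (PySem.List.sorted (t.map (fun i => pvGetS resultCube i)) (fun x => x)))

def validateCube_alt (cubeVal : List String) (resultCube : List String) : String :=
  if cubeVal.length ≠ 54 then "error: cube is not sized properly"
  else
    let colorCount := PySem.Dict.counter cubeVal
    if colorCount.items.length ≠ 6 then "error: cube does not contain 6 unique colors"
    else if pvB_centers.any (fun i => pvGetS cubeVal i != pvGetS resultCube i) then "error: illegal cube"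
    else if colorCount.values.any (fun n => n != 9) then "error: illegal cube"
    else if !(pvB_piecesOk cubeVal resultCube pvB_cornerIdx) then "error: illegal cube with wrong corners"
    else if !(pvB_piecesOk cubeVal resultCube pvB_edgeIdx) then "error: illegal cube with wrong edges"
    else "valid"

-- ===== PRECONDITION & SPEC =====
-- Pre_ excludes the inputs with a 54-sticker, 6-colour cubeVal but a resultCube shorter than 54
-- entries: on most of that region A raises IndexError, except that a center mismatch or a colour
-- count ≠ 9 can return 'error: illegal cube' before the out-of-range access is reached (B returns
-- the same string there); the region is excluded as a whole.
def Pre_validateCube (cubeVal : List String) (resultCube : List String) : Prop :=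
  cubeVal.length = 54 → (PySem.Set.ofList cubeVal).length = 6 → 54 ≤ resultCube.length
instance (cubeVal : List String) (resultCube : List String) : Decidable (Pre_validateCube cubeVal resultCube) := by
  unfold Pre_validateCube; infer_instance

def pvWitness_validateCube : List String × List String := (["W"], ["W"])

def Spec_validateCube (cubeVal : List String) (resultCube : List String) (out : String) : Prop :=
  out = validateCube_alt cubeVal resultCube
instance (cubeVal : List String) (resultCube : List String) (out : String) : Decidable (Spec_validateCube cubeVal resultCube out) := by
  unfold Spec_validateCube; infer_instance

-- ===== CLAIM (what is proved, stated in full; the proofs are below) =====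
def Claim_equal_validateCube : Prop := ∀ (cubeVal : List String) (resultCube : List String), Dom_validateCube cubeVal resultCube → Pre_validateCube cubeVal resultCube → Spec_validateCube cubeVal resultCube (validateCube cubeVal resultCube)

-- ===== LEMMAS AND PROOFS =====

-- Counter(xs).values() as an explicit list of multiplicities
theorem pv_values_counter {κ : Type} [BEq κ] [LawfulBEq κ] (xs : List κ) :
    (PySem.Dict.counter xs).values = (PySem.Set.ofList xs).map (fun k => ((List.count k xs : Int))) := by
  show (PySem.Dict.counter xs).items.map Prod.snd = _
  rw [PySem.Dict.items_counter, List.map_map]; rfl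

-- A's duplicate test (sum of Counter multiplicities > 1) detects exactly a non-Nodup list
theorem pv_dup_iff (xs : List (List String)) :
    (0 < ((PySem.Dict.counter xs).values.filter (fun y => 1 < y)).sum) ↔ ¬ xs.Nodup := by
  rw [pv_values_counter, List.nodup_iff_count_le_one]
  set L := (((PySem.Set.ofList xs).map (fun k => ((List.count k xs : Int)))).filter (fun y => decide (1 < y))) with hL
  have hallpos : ∀ y ∈ L, (0:Int) < y := by
    intro y hy
    have := (List.mem_filter.mp hy).2
    simp at this; omega
  constructor
  · intro h
    by_contra hno
    have hnil : L = [] := by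
      rw [hL, List.filter_eq_nil_iff]
      intro a ha
      obtain ⟨k, _, rfl⟩ := List.mem_map.mp ha
      simpa using hno k
    rw [hnil] at h; simp at h
  · intro h
    obtain ⟨k, hk⟩ := by simpa only [not_forall, not_le] using h
    have hkmem : k ∈ xs := by
      by_contra hnm
      rw [List.count_eq_zero_of_not_mem hnm] at hk; omega
    have hmemL : ((List.count k xs : Int)) ∈ L := by
      rw [hL]
      apply List.mem_filter.mpr
      refine ⟨List.mem_map.mpr ⟨k, (PySem.Set.mem_ofList xs k).mpr hkmem, rfl⟩, by simp; omega⟩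
    exact List.sum_pos L hallpos (by intro hnil; rw [hnil] at hmemL; simp at hmemL)

-- B's duplicate test (len(set(xs)) ≠ len(xs)) detects exactly a non-Nodup list
theorem pv_setlen_iff (xs : List (List String)) :
    ((PySem.Set.ofList xs).length = xs.length) ↔ xs.Nodup := by
  have hperm : (PySem.Set.ofList xs).Perm xs.dedup := by
    rw [List.perm_ext_iff_of_nodup (PySem.Set.nodup_ofList xs) (List.nodup_dedup xs)]
    intro a; simp [PySem.Set.mem_ofList, List.mem_dedup]
  constructor
  · intro h
    have hd : xs.dedup.length = xs.length := by rw [← hperm.length_eq]; exact h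
    have heq := (List.dedup_sublist xs).eq_of_length hd
    have := List.nodup_dedup xs
    rwa [heq] at this
  · intro h; rw [PySem.Set.ofList_eq_self_of_nodup xs h]

-- Python's Counter(i) == Counter(j) is multiset equality, i.e. equality of the sorted lists
theorem pv_counterEq_eq (i j : List String) :
    pvCounterEq i j = (PySem.List.sorted i (fun x => x) == PySem.List.sorted j (fun x => x)) := by
  rw [Bool.eq_iff_iff, beq_iff_eq, PySem.List.sorted_id_eq_sorted_id_iff_perm, List.perm_iff_count]
  unfold pvCounterEq
  rw [Bool.and_eq_true, List.all_eq_true, List.all_eq_true]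
  simp only [PySem.Dict.items_counter, List.mem_map, PySem.Dict.getD_counter, beq_iff_eq,
    PySem.Set.mem_ofList, forall_exists_index, and_imp]
  constructor
  · rintro ⟨h1, h2⟩ a
    by_cases hai : a ∈ i
    · have := h1 (a, (List.count a i : Int)) a hai rfl
      simp at this; exact_mod_cast this.symm
    · by_cases haj : a ∈ j
      · have := h2 (a, (List.count a j : Int)) a haj rfl
        simp at this; exact_mod_cast this
      · rw [List.count_eq_zero_of_not_mem hai, List.count_eq_zero_of_not_mem haj]
  · intro h
    constructor
    · rintro kv a ha rfl; simp; exact_mod_cast (h a).symm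
    · rintro kv a ha rfl; simp; exact_mod_cast (h a)

-- A's nested count over distinct cube pieces reaches |R| exactly when every result piece occurs
theorem pv_count_eq_iff (C R : List (List String))
    (hC : (C.map (fun i => PySem.List.sorted i (fun x => x))).Nodup) :
    (R.foldl (fun count i => C.foldl (fun count j => if pvCounterEq i j then count + 1 else count) count) (0 : Int)
        = (R.length : Int))
      ↔ ∀ i ∈ R, (PySem.List.sorted i (fun x => x)) ∈ C.map (fun i => PySem.List.sorted i (fun x => x)) := by
  have hcnt : ∀ i : List String,
      List.countP (fun j => pvCounterEq i j) C
        = if (PySem.List.sorted i (fun x => x)) ∈ C.map (fun i => PySem.List.sorted i (fun x => x)) then 1 else 0 := by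
    intro i
    have h1 : List.countP (fun j => pvCounterEq i j) C
        = List.count (PySem.List.sorted i (fun x => x)) (C.map (fun i => PySem.List.sorted i (fun x => x))) := by
      rw [List.count_eq_countP, List.countP_map]
      apply List.countP_congr
      intro a _
      rw [pv_counterEq_eq]
      simp only [Function.comp]
      rw [Bool.eq_iff_iff]
      simp only [beq_iff_eq, iff_true]
      exact eq_comm
    rw [h1]
    by_cases hm : (PySem.List.sorted i (fun x => x)) ∈ C.map (fun i => PySem.List.sorted i (fun x => x))
    · rw [if_pos hm]; exact List.count_eq_one_of_mem hC hm
    · rw [if_neg hm]; exact List.count_eq_zero_of_not_mem hm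
  have hfold : (R.foldl (fun count i => C.foldl (fun count j => if pvCounterEq i j then count + 1 else count) count) (0 : Int))
      = ((List.countP (fun i => decide ((PySem.List.sorted i (fun x => x)) ∈ C.map (fun i => PySem.List.sorted i (fun x => x)))) R : Int)) := by
    simp only [PySem.List.foldl_count_if]
    rw [PySem.List.foldl_add]
    simp only [hcnt]
    rw [zero_add, ← PySem.List.sum_map_ite_one_zero]
    congr 1
    apply List.map_congr_left
    intro i _
    by_cases h : (PySem.List.sorted i (fun x => x)) ∈ C.map (fun i => PySem.List.sorted i (fun x => x))
    · simp [h]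
    · simp [h]
  rw [hfold]
  constructor
  · intro h
    have : List.countP (fun i => decide ((PySem.List.sorted i (fun x => x)) ∈ C.map (fun i => PySem.List.sorted i (fun x => x)))) R = R.length := by exact_mod_cast h
    have := List.countP_eq_length.mp this
    intro i hi; simpa using this i hi
  · intro h
    have : List.countP (fun i => decide ((PySem.List.sorted i (fun x => x)) ∈ C.map (fun i => PySem.List.sorted i (fun x => x)))) R = R.length := by
      apply List.countP_eq_length.mpr
      intro a ha; simpa using h a ha
    exact_mod_cast this

theorem pv_valid_core (Cl Rl : List (List String)) :
    (((if 0 < ((PySem.Dict.counter (Cl.map (fun i => PySem.List.sorted i (fun x => x)))).values.filter (fun y => 1 < y)).sum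
        then some "invalid"
        else if (Rl.foldl (fun count i => Cl.foldl (fun count j => if pvCounterEq i j then count + 1 else count) count) (0 : Int)) ≠ (Rl.length : Int)
          then some "invalid" else (none : Option String)) == some "invalid") = true)
    ↔ ((if (PySem.Set.ofList (Cl.map (fun i => PySem.List.sorted i (fun x => x)))).length ≠ (Cl.map (fun i => PySem.List.sorted i (fun x => x))).length
          then false
          else Rl.all (fun i => (PySem.Set.ofList (Cl.map (fun i => PySem.List.sorted i (fun x => x)))).contains (PySem.List.sorted i (fun x => x)))) = false) := by
  by_cases hnd : (Cl.map (fun i => PySem.List.sorted i (fun x => x))).Nodup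
  · have hdupf : ¬ (0 < ((PySem.Dict.counter (Cl.map (fun i => PySem.List.sorted i (fun x => x)))).values.filter (fun y => 1 < y)).sum) := by
      rw [pv_dup_iff]; exact not_not_intro hnd
    have hlenf : ¬ ((PySem.Set.ofList (Cl.map (fun i => PySem.List.sorted i (fun x => x)))).length ≠ (Cl.map (fun i => PySem.List.sorted i (fun x => x))).length) := by
      rw [Ne, pv_setlen_iff]; exact not_not_intro hnd
    rw [if_neg hdupf, if_neg hlenf]
    by_cases hall : (Rl.foldl (fun count i => Cl.foldl (fun count j => if pvCounterEq i j then count + 1 else count) count) (0 : Int)) = (Rl.length : Int)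
    · rw [if_neg (not_not_intro hall)]
      have hallb : (Rl.all (fun i => (PySem.Set.ofList (Cl.map (fun i => PySem.List.sorted i (fun x => x)))).contains (PySem.List.sorted i (fun x => x)))) = true := by
        simp only [List.all_eq_true, PySem.Set.contains_iff, PySem.Set.mem_ofList]
        exact (pv_count_eq_iff Cl Rl hnd).mp hall
      rw [hallb]; simp
    · rw [if_pos hall]
      have hallb : (Rl.all (fun i => (PySem.Set.ofList (Cl.map (fun i => PySem.List.sorted i (fun x => x)))).contains (PySem.List.sorted i (fun x => x)))) = false := by
        rw [Bool.eq_false_iff]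
        intro htrue
        apply hall
        apply (pv_count_eq_iff Cl Rl hnd).mpr
        simpa only [List.all_eq_true, PySem.Set.contains_iff, PySem.Set.mem_ofList] using htrue
      rw [hallb]; simp
  · have hdupt : (0 < ((PySem.Dict.counter (Cl.map (fun i => PySem.List.sorted i (fun x => x)))).values.filter (fun y => 1 < y)).sum) := by
      rw [pv_dup_iff]; exact hnd
    have hlent : ((PySem.Set.ofList (Cl.map (fun i => PySem.List.sorted i (fun x => x)))).length ≠ (Cl.map (fun i => PySem.List.sorted i (fun x => x))).length) := by
      rw [Ne, pv_setlen_iff]; exact hnd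
    rw [if_pos hdupt, if_pos hlent]
    simp

-- corner validator bridge
theorem pv_corners_bridge (c r : List String) :
    ((pvA_validateCorners c r == some "invalid") = true) ↔ (pvB_piecesOk c r pvB_cornerIdx = false) :=
  pv_valid_core (pvA_cornersOf c) (pvA_cornersOf r)

-- edge validator bridge
theorem pv_edges_bridge (c r : List String) :
    ((pvA_validateEdges c r == some "invalid") = true) ↔ (pvB_piecesOk c r pvB_edgeIdx = false) :=
  pv_valid_core (pvA_edgesOf c) (pvA_edgesOf r)

-- colour-count guards agree once the cube has exactly 6 distinct colours
theorem pv_counts_bridge (c : List String) (h6 : (PySem.Set.ofList c).length = 6) :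
    (((PySem.List.pyRange 0 6).any
        (fun i => PySem.List.count c (pvGetS (PySem.Set.ofList c) i) != 9)) = true)
      ↔ (((PySem.Dict.counter c).values.any (fun n => n != 9)) = true) := by
  rw [pv_values_counter]
  have hr : PySem.List.pyRange 0 6 = [0, 1, 2, 3, 4, 5] := by decide
  rw [hr]
  revert h6
  generalize PySem.Set.ofList c = s
  intro h6
  rcases s with _ | ⟨a, _ | ⟨b, _ | ⟨d, _ | ⟨e, _ | ⟨f, _ | ⟨g, _ | ⟨h, t⟩⟩⟩⟩⟩⟩⟩ <;> simp at h6
  simp only [List.any_cons, List.any_nil, List.map_cons, List.map_nil, pvGetS,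
    PySem.List.pyGetD_ofNat', List.getD_cons_zero, List.getD_cons_succ,
    PySem.List.count_eq, Bool.or_eq_true, bne_iff_ne, ne_eq, Bool.false_eq_true, or_false]
  omega


-- ===== VERDICT (by name: the statement is the Claim_ definition above) =====
theorem validateCube_spec : Claim_equal_validateCube := by
  intro c r _hDom _hPre
  show validateCube c r = validateCube_alt c r
  have hitems : (PySem.Dict.counter c).items.length = (PySem.Set.ofList c).length := by
    rw [PySem.Dict.items_counter, List.length_map]
  by_cases h54 : c.length = 54
  · by_cases h6 : (PySem.Set.ofList c).length = 6
    · have h4 : ((PySem.List.pyRange 0 6).any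
          (fun i => PySem.List.count c (pvGetS (PySem.Set.ofList c) i) != 9))
          = ((PySem.Dict.counter c).values.any (fun n => n != 9)) :=
        Bool.eq_iff_iff.mpr (pv_counts_bridge c h6)
      have hcor : (pvA_validateCorners c r == some "invalid")
          = !(pvB_piecesOk c r pvB_cornerIdx) := by
        rw [Bool.eq_iff_iff, Bool.not_eq_true']; exact pv_corners_bridge c r
      have hedg : (pvA_validateEdges c r == some "invalid")
          = !(pvB_piecesOk c r pvB_edgeIdx) := by
        rw [Bool.eq_iff_iff, Bool.not_eq_true']; exact pv_edges_bridge c r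
      simp only [validateCube, validateCube_alt, pvB_centers, hitems, h4, hcor, hedg]
      rfl
    · simp [validateCube, validateCube_alt, h54, hitems, h6]
  · simp [validateCube, validateCube_alt, h54]
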